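-- pv_equiv track=rewrite | github.com/TommasoFazzi/INTELLIGENCE_ITA | scripts/backfill_report_titles.py | extract_bluf
-- ===== SOURCE A (Python) =====
-- def extract_bluf(text: str) -> str:
--     """
--     Extract content for title generation: prefer H2/H3 headings (day-specific)
--     over the boilerplate executive summary opening paragraph.
--     """
--     if not text:
--         return ""
--     # Pass 1: collect H2/H3 headings (most specific content)
--     headings = []
--     for line in text.splitlines():
--         stripped = line.strip()
--         if stripped.startswith('## ') or stripped.startswith('### '):
--             heading = stripped.lstrip('#').strip()
--             lower = heading.lower()
--             if any(skip in lower for skip in ('executive summary', 'strategic', 'investment', 'trade signal', 'macro', 'overview', 'key development', 'conclusion')):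
--                 continue
--             headings.append(heading)
--             if len(headings) >= 5:
--                 break
--     if headings:
--         return ' | '.join(headings)[:400]
--     # Pass 2: fallback to first real prose paragraph
--     for line in text.splitlines():
--         stripped = line.strip()
--         if not stripped:
--             continue
--         if stripped.startswith('#') or stripped.startswith('---') or stripped.startswith('|') or stripped.startswith('*'):
--             continue
--         clean = stripped.replace('**', '').replace('*', '').strip()
--         if len(clean) > 40:
--             return clean[:300]
--     return ""
-- ===== SOURCE B (Python) =====
-- def extract_bluf(text: str) -> str:
--     """Single fused pass over the lines: collect up to 5 non-skip H2/H3 headings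
--     and remember the first qualifying prose line; pick at the end."""
--     if not text:
--         return ""
--     skips = ('executive summary', 'strategic', 'investment', 'trade signal',
--              'macro', 'overview', 'key development', 'conclusion')
--     headings = []
--     prose = None
--     for line in text.splitlines():
--         s = line.strip()
--         if s.startswith('## ') or s.startswith('### '):
--             if len(headings) < 5:
--                 h = s.lstrip('#').strip()
--                 if not any(k in h.lower() for k in skips):
--                     headings.append(h)
--         elif prose is None and s and not s.startswith(('#', '---', '|', '*')):
--             clean = s.replace('**', '').replace('*', '').strip()
--             if len(clean) > 40:
--                 prose = clean
--     if headings: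
--         return ' | '.join(headings)[:400]
--     if prose is not None:
--         return prose[:300]
--     return ""
-- ===== Notes on version B (the rewrite author's own statement) =====
-- stated objective: simpler
-- what changed: The two sequential scans of text.splitlines() (heading collection, then a full prose fallback rescan) are fused into one pass that carries both the heading list and the first prose candidate, splitting the text only once and choosing the result at the end.
import Mathlib
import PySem

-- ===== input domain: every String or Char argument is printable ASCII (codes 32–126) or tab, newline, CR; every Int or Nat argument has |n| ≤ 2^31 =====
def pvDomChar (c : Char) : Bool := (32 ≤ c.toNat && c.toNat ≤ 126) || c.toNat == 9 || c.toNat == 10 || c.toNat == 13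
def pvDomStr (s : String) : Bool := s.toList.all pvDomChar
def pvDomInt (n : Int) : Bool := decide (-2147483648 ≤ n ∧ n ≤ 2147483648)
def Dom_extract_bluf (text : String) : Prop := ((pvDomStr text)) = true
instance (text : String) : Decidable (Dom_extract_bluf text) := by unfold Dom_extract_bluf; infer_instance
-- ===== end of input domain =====

-- B fuses A's two sequential line scans into one pass carrying both accumulators (same values; objective: simpler).

-- shared constant: the skip keywords, and s.lstrip('#') ported by hand (exact: drops exactly the leading '#' run)
def pvSkips : List String := ["executive summary", "strategic", "investment", "trade signal", "macro", "overview", "key development", "conclusion"]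
def pvLstripHash (s : String) : String := String.ofList (s.toList.dropWhile (fun c => c == '#'))

-- ===== PORT A =====
def pvPass1 : List String → List String → List String
  | [], headings => headings
  | line :: rest, headings =>
    let stripped := PySem.Str.strip line
    if PySem.Str.startswith stripped "## " || PySem.Str.startswith stripped "### " then
      let heading := PySem.Str.strip (pvLstripHash stripped)
      let lower := PySem.Str.lower heading
      if pvSkips.any (fun skip => PySem.Str.isIn skip lower) then
        pvPass1 rest headings
      else
        let headings' := headings ++ [heading]
        if 5 ≤ headings'.length then headings' else pvPass1 rest headings'
    else pvPass1 rest headings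

def pvPass2 : List String → String
  | [] => ""
  | line :: rest =>
    let stripped := PySem.Str.strip line
    if stripped == "" then pvPass2 rest
    else if PySem.Str.startswith stripped "#" || PySem.Str.startswith stripped "---" ||
            PySem.Str.startswith stripped "|" || PySem.Str.startswith stripped "*" then pvPass2 rest
    else
      let clean := PySem.Str.strip (PySem.Str.replace (PySem.Str.replace stripped "**" "") "*" "")
      if 40 < PySem.Str.len clean then PySem.Str.slice clean none (some 300) else pvPass2 rest

def extract_bluf (text : String) : String :=
  if text == "" then ""
  else
    let headings := pvPass1 (PySem.Str.splitlines text) []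
    if headings.isEmpty then pvPass2 (PySem.Str.splitlines text)
    else PySem.Str.slice (PySem.Str.join " | " headings) none (some 400)

-- ===== PORT B =====
def pvScanB : List String → List String → Option String → List String × Option String
  | [], headings, prose => (headings, prose)
  | line :: rest, headings, prose =>
    let s := PySem.Str.strip line
    if PySem.Str.startswith s "## " || PySem.Str.startswith s "### " then
      if headings.length < 5 then
        let h := PySem.Str.strip (pvLstripHash s)
        if pvSkips.any (fun k => PySem.Str.isIn k (PySem.Str.lower h)) then
          pvScanB rest headings prose
        else pvScanB rest (headings ++ [h]) prose
      else pvScanB rest headings prose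
    else if prose.isNone && !(s == "") &&
            !(PySem.Str.startswith s "#" || PySem.Str.startswith s "---" ||
              PySem.Str.startswith s "|" || PySem.Str.startswith s "*") then
      let clean := PySem.Str.strip (PySem.Str.replace (PySem.Str.replace s "**" "") "*" "")
      if 40 < PySem.Str.len clean then pvScanB rest headings (some clean)
      else pvScanB rest headings prose
    else pvScanB rest headings prose

def extract_bluf_alt (text : String) : String :=
  if text == "" then ""
  else
    let r := pvScanB (PySem.Str.splitlines text) [] none
    if r.1.isEmpty then
      match r.2 with
      | some p => PySem.Str.slice p none (some 300)
      | none => ""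
    else PySem.Str.slice (PySem.Str.join " | " r.1) none (some 400)

-- ===== PRECONDITION & SPEC =====
def Spec_extract_bluf (text : String) (out : String) : Prop := out = extract_bluf_alt text
instance (text : String) (out : String) : Decidable (Spec_extract_bluf text out) := by unfold Spec_extract_bluf; infer_instance

-- ===== CLAIM (what is proved, stated in full; the proofs are below) =====
def Claim_equal_extract_bluf : Prop := ∀ (text : String), Dom_extract_bluf text → Spec_extract_bluf text (extract_bluf text)

-- ===== LEMMAS AND PROOFS =====
theorem pv_startswith_hash {s : String}
    (h : (PySem.Str.startswith s "## " || PySem.Str.startswith s "### ") = true) :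
    PySem.Str.startswith s "#" = true := by
  rcases Bool.or_eq_true_iff.mp h with h | h <;>
  · simp only [PySem.Str.startswith_eq, PySem.Chars.startswith_iff] at h ⊢
    exact List.IsPrefix.trans (by decide) h

theorem pv_heading_ne_empty {s : String}
    (h : (PySem.Str.startswith s "## " || PySem.Str.startswith s "### ") = true) :
    (s == "") = false := by
  have hh := pv_startswith_hash h
  cases hb : s == ""
  · rfl
  · have : s = "" := eq_of_beq hb
    subst this
    exact absurd hh (by decide)

theorem pvScanB_full (lines : List String) (hs : List String) (p : Option String)
    (h : ¬ hs.length < 5) : (pvScanB lines hs p).1 = hs := by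
  induction lines generalizing p with
  | nil => rfl
  | cons line rest ih =>
    simp only [pvScanB]
    by_cases h1 : PySem.Str.startswith (PySem.Str.strip line) "## " ||
                  PySem.Str.startswith (PySem.Str.strip line) "### "
    · rw [if_pos h1, if_neg h]; exact ih p
    · rw [if_neg h1]
      split_ifs with h2 h3
      · exact ih _
      · exact ih p
      · exact ih p

theorem pvScanB_fst (lines : List String) (hs : List String) (p : Option String)
    (h : hs.length < 5) : (pvScanB lines hs p).1 = pvPass1 lines hs := by
  induction lines generalizing hs p with
  | nil => rfl
  | cons line rest ih =>
    simp only [pvScanB, pvPass1]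
    by_cases h1 : PySem.Str.startswith (PySem.Str.strip line) "## " ||
                  PySem.Str.startswith (PySem.Str.strip line) "### "
    · rw [if_pos h1, if_pos h1, if_pos h]
      by_cases h2 : pvSkips.any fun k =>
          PySem.Str.isIn k (PySem.Str.lower (PySem.Str.strip (pvLstripHash (PySem.Str.strip line))))
      · rw [if_pos h2, if_pos h2]; exact ih hs p h
      · rw [if_neg h2, if_neg h2]
        by_cases h3 : 5 ≤ (hs ++ [PySem.Str.strip (pvLstripHash (PySem.Str.strip line))]).length
        · rw [if_pos h3]
          exact pvScanB_full rest _ p (by simp at h3 ⊢; omega)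
        · rw [if_neg h3]
          exact ih _ p (by simp at h3 ⊢; omega)
    · rw [if_neg h1, if_neg h1]
      split_ifs with h2 h3
      · exact ih hs _ h
      · exact ih hs p h
      · exact ih hs p h

theorem pvScanB_some (lines : List String) (hs : List String) (q : String) :
    (pvScanB lines hs (some q)).2 = some q := by
  induction lines generalizing hs with
  | nil => rfl
  | cons line rest ih =>
    simp only [pvScanB]
    by_cases h1 : PySem.Str.startswith (PySem.Str.strip line) "## " ||
                  PySem.Str.startswith (PySem.Str.strip line) "### "
    · rw [if_pos h1]
      split_ifs with h2 h3
      · exact ih hs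
      · exact ih _
      · exact ih hs
    · rw [if_neg h1]
      split_ifs with h2 h3
      · simp at h2
      · simp at h2
      · exact ih hs

theorem pvScanB_snd (lines : List String) (hs : List String) :
    pvPass2 lines = (match (pvScanB lines hs none).2 with
                     | some c => PySem.Str.slice c none (some 300)
                     | none => "") := by
  induction lines generalizing hs with
  | nil => rfl
  | cons line rest ih =>
    simp only [pvScanB, pvPass2]
    by_cases h1 : PySem.Str.startswith (PySem.Str.strip line) "## " ||
                  PySem.Str.startswith (PySem.Str.strip line) "### "
    · -- heading line: pass 2 skips it (it starts with '#'), B's scan keeps prose = none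
      rw [if_neg (by rw [pv_heading_ne_empty h1]; exact Bool.false_ne_true),
          if_pos (by rw [pv_startswith_hash h1]; rfl), if_pos h1]
      split_ifs with h2 h3
      · exact ih hs
      · exact ih _
      · exact ih hs
    · rw [if_neg h1]
      by_cases hse : (PySem.Str.strip line == "") = true
      · -- blank line: both skip (B's fused prose condition fails on it)
        rw [if_pos hse, if_neg (fun hc => by rw [hse] at hc; simp at hc)]
        exact ih hs
      · have hse' : (PySem.Str.strip line == "") = false := Bool.eq_false_iff.mpr hse
        rw [if_neg hse]
        by_cases h4 : (PySem.Str.startswith (PySem.Str.strip line) "#" ||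
              PySem.Str.startswith (PySem.Str.strip line) "---" ||
              PySem.Str.startswith (PySem.Str.strip line) "|" ||
              PySem.Str.startswith (PySem.Str.strip line) "*") = true
        · -- filtered line: both skip
          rw [if_pos h4, if_neg (fun hc => by rw [h4] at hc; simp at hc)]
          exact ih hs
        · have h4' : (PySem.Str.startswith (PySem.Str.strip line) "#" ||
              PySem.Str.startswith (PySem.Str.strip line) "---" ||
              PySem.Str.startswith (PySem.Str.strip line) "|" ||
              PySem.Str.startswith (PySem.Str.strip line) "*") = false := Bool.eq_false_iff.mpr h4
          have hcond : (Option.isNone (none : Option String) && !(PySem.Str.strip line == "") &&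
              !(PySem.Str.startswith (PySem.Str.strip line) "#" ||
                PySem.Str.startswith (PySem.Str.strip line) "---" ||
                PySem.Str.startswith (PySem.Str.strip line) "|" ||
                PySem.Str.startswith (PySem.Str.strip line) "*")) = true := by
            rw [hse', h4']; rfl
          rw [if_neg h4, if_pos hcond]
          split_ifs with h6
          · rw [pvScanB_some rest hs]
          · exact ih hs

-- ===== VERDICT (by name: the statement is the Claim_ definition above) =====
theorem extract_bluf_spec : Claim_equal_extract_bluf := by
  intro text _
  unfold Spec_extract_bluf extract_bluf extract_bluf_alt
  split_ifs with h
  · rfl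
  · have hfst := pvScanB_fst (PySem.Str.splitlines text) [] none (by simp)
    by_cases hempty : (pvPass1 (PySem.Str.splitlines text) []).isEmpty
    · simp only [hfst, hempty, if_pos]
      rw [pvScanB_snd (PySem.Str.splitlines text) []]
    · simp [hfst, hempty]
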